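-- pv_equiv track=rewrite | github.com/coderamen666/cassie | laboratory/solve.py | polymult
-- ===== SOURCE A (Python) =====
-- def polyclean(p): # Cleans out powers with null coefficients
-- 	if p == {}:
-- 		return {}
-- 	else:
-- 		out = {}
-- 		for power in p:
-- 			if p[power] != 0:
-- 				out[power] = p[power]
-- 		return out
--
-- def polyzero(p): # Checks if polynomial is zero
-- 	tmp = polyclean(p)
-- 	return tmp == {}
--
-- def addpolys(polys): # Adds a list of polynomials together
-- 	result = {}
-- 	for poly in polys:
-- 		poly = polyclean(poly)
-- 		if polyzero(poly):
-- 			continue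
-- 		for power in poly:
-- 			if power not in result:
-- 				result[power] = 0
-- 			result[power] += poly[power]
-- 	return polyclean(result)
--
-- def distmon(poly, monomial): # Distributes monomial across polynomial
-- 	poly = polyclean(poly)
-- 	if polyzero(poly) or polyzero(monomial):
-- 		return {}
-- 	result = {}
-- 	monomial_pow = list(monomial.keys())[0]
-- 	monomial_coef = monomial[monomial_pow]
-- 	for power in poly:
-- 		new_power = power + monomial_pow
-- 		new_coef = poly[power] * monomial_coef
-- 		result[new_power] = new_coef
-- 	return polyclean(result)
--
-- def polymult(p1, p2): # Multiplies 2 polynomials together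
-- 	p1, p2 = polyclean(p1), polyclean(p2)
-- 	if polyzero(p1) or polyzero(p2):
-- 		return {}
-- 	else:
-- 		intermediates = []
-- 		for power in p2:
-- 			monomial = {power : p2[power]}
-- 			intermediates.append(distmon(p1, monomial))
-- 		return addpolys(intermediates)
-- ===== SOURCE B (Python) =====
-- def polymult(p1, p2):  # Multiplies 2 polynomials together
-- 	q1 = {a: c for a, c in p1.items() if c != 0}
-- 	q2 = {b: c for b, c in p2.items() if c != 0}
-- 	powers = dict.fromkeys(a + b for b in q2 for a in q1)
-- 	out = {}
-- 	for s in powers: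
-- 		c = sum(q1[a] * q2[s - a] for a in q1 if s - a in q2)
-- 		if c != 0:
-- 			out[s] = c
-- 	return out
-- ===== Notes on version B (the rewrite author's own statement) =====
-- stated objective: alternative
-- what changed: Instead of A's distribute-and-merge (one intermediate dict per monomial of p2, each polycleaned, then addpolys folds them together), B computes the set of output powers once and evaluates each output coefficient directly as a convolution sum q1[a]*q2[s-a] via hash lookups into the cleaned inputs; Pre_ only excludes association lists with duplicate powers, which do not represent any Python dict input.
import Mathlib
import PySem

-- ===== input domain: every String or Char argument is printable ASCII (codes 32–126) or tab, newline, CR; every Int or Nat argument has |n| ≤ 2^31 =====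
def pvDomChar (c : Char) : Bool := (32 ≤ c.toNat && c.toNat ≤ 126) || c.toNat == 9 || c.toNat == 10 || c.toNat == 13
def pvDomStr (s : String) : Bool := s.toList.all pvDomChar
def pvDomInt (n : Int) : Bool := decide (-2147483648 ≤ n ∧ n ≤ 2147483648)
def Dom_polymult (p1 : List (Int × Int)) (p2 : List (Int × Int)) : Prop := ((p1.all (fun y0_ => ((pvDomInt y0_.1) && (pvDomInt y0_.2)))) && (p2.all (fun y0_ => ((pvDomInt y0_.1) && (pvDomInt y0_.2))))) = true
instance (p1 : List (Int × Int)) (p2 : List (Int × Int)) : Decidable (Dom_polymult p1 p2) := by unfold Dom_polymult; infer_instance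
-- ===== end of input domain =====

-- B replaces A's distribute-and-merge (per-monomial intermediate dicts folded by addpolys) with a direct
-- per-output-power convolution sum via lookups into the cleaned inputs (alternative algorithm, similar cost).


-- ===== PORT A =====
-- polyclean(p): drop powers with zero coefficient (iterates keys, looks each value up)
def polycleanA (p : PySem.Dict Int Int) : PySem.Dict Int Int :=
  if p = PySem.Dict.empty then PySem.Dict.empty
  else p.keys.foldl (fun out power =>
        if p.getD power 0 ≠ 0 then out.insert power (p.getD power 0) else out)
      PySem.Dict.empty

-- polyzero(p): Python's 'polyclean(p) == {}' (dict equality against {} is emptiness)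
def polyzeroA (p : PySem.Dict Int Int) : Bool := decide (polycleanA p = PySem.Dict.empty)

-- addpolys(polys)
def addpolysA (polys : List (PySem.Dict Int Int)) : PySem.Dict Int Int :=
  let result := polys.foldl (fun result poly0 =>
    let poly := polycleanA poly0
    if polyzeroA poly then result
    else poly.keys.foldl (fun r power =>
      let r := if r.contains power then r else r.insert power 0
      r.insert power (r.getD power 0 + poly.getD power 0)) result) PySem.Dict.empty
  polycleanA result

-- distmon(poly, monomial); 'list(monomial.keys())[0]' is pyGetD keys 0 (guarded non-empty by polyzero)
def distmonA (poly0 monomial : PySem.Dict Int Int) : PySem.Dict Int Int :=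
  let poly := polycleanA poly0
  if polyzeroA poly || polyzeroA monomial then PySem.Dict.empty
  else
    let mpow := PySem.List.pyGetD monomial.keys 0 0
    let mcoef := monomial.getD mpow 0
    let result := poly.keys.foldl (fun r power =>
      r.insert (power + mpow) (poly.getD power 0 * mcoef)) PySem.Dict.empty
    polycleanA result

def polymult (p1 : List (Int × Int)) (p2 : List (Int × Int)) : List (Int × Int) :=
  let q1 := polycleanA (PySem.Dict.mk p1)
  let q2 := polycleanA (PySem.Dict.mk p2)
  if polyzeroA q1 || polyzeroA q2 then []
  else
    let intermediates := q2.keys.foldl (fun acc power =>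
      acc ++ [distmonA q1 (PySem.Dict.insert PySem.Dict.empty power (q2.getD power 0))]) []
    (addpolysA intermediates).items

-- ===== PORT B =====
-- dict comprehension '{k: v for k, v in p.items() if v != 0}'
def cleanB (p : List (Int × Int)) : PySem.Dict Int Int :=
  p.foldl (fun d kv => if kv.2 ≠ 0 then d.insert kv.1 kv.2 else d) PySem.Dict.empty

-- 'sum(q1[a] * q2[s - a] for a in q1 if s - a in q2)'
def convB (q1 q2 : PySem.Dict Int Int) (s : Int) : Int :=
  q1.keys.foldl (fun acc a =>
    if q2.contains (s - a) then acc + q1.getD a 0 * q2.getD (s - a) 0 else acc) 0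

def polymult_alt (p1 : List (Int × Int)) (p2 : List (Int × Int)) : List (Int × Int) :=
  let q1 := cleanB p1
  let q2 := cleanB p2
  -- 'dict.fromkeys(a + b for b in q2 for a in q1)' — ordered first-occurrence dedup
  let powers := PySem.List.dedup (q2.keys.flatMap (fun b => q1.keys.map (fun a => a + b)))
  let out := powers.foldl (fun out s =>
    let c := convB q1 q2 s
    if c ≠ 0 then out.insert s c else out) PySem.Dict.empty
  out.items

-- ===== PRECONDITION & SPEC =====
-- Pre_ excludes association lists with duplicate powers: they do not represent any Python dict
-- (A's arguments are dicts, whose keys are unique), so A's behaviour on them is not defined by the source.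
def Pre_polymult (p1 : List (Int × Int)) (p2 : List (Int × Int)) : Prop :=
  (p1.map Prod.fst).Nodup ∧ (p2.map Prod.fst).Nodup
instance (p1 : List (Int × Int)) (p2 : List (Int × Int)) : Decidable (Pre_polymult p1 p2) := by unfold Pre_polymult; infer_instance
def pvWitness_polymult : (List (Int × Int)) × (List (Int × Int)) := ([(0, 2), (1, 3)], [(1, 1), (2, 0)])
def Spec_polymult (p1 : List (Int × Int)) (p2 : List (Int × Int)) (out : List (Int × Int)) : Prop := out = polymult_alt p1 p2
instance (p1 : List (Int × Int)) (p2 : List (Int × Int)) (out : List (Int × Int)) : Decidable (Spec_polymult p1 p2 out) := by unfold Spec_polymult; infer_instance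

-- ===== CLAIM (what is proved, stated in full; the proofs are below) =====
def Claim_equal_polymult : Prop := ∀ (p1 : List (Int × Int)) (p2 : List (Int × Int)), Dom_polymult p1 p2 → Pre_polymult p1 p2 → Spec_polymult p1 p2 (polymult p1 p2)

-- ===== LEMMAS AND PROOFS =====

-- the zero-coefficient filter both programs compute
def zfilter (l : List (Int × Int)) : List (Int × Int) := l.filter (fun kv => kv.2 != 0)

-- the list of all (power, product) pairs, in A's traversal order (p2 outer, p1 inner)
def pvPairs (c1 c2 : List (Int × Int)) : List (Int × Int) :=
  c2.flatMap (fun bv => c1.map (fun av => (av.1 + bv.1, av.2 * bv.2)))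

-- total coefficient contributed to power s by a pair list
def pvSumAt (l : List (Int × Int)) (s : Int) : Int :=
  (l.map (fun kv => if kv.1 = s then kv.2 else 0)).sum

theorem zfilter_idem (l : List (Int × Int)) : zfilter (zfilter l) = zfilter l :=
  List.filter_eq_self.mpr (fun _ ha => (List.mem_filter.mp ha).2)

theorem zfilter_nodup_fst (l : List (Int × Int)) (h : (l.map Prod.fst).Nodup) :
    ((zfilter l).map Prod.fst).Nodup :=
  h.sublist ((List.filter_sublist (l := l)).map Prod.fst)

-- a filter-insert loop over fresh distinct keys appends exactly the filtered pairs
theorem cleanB_items_aux (l : List (Int × Int)) (acc : PySem.Dict Int Int)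
    (h : (acc.keys ++ l.map Prod.fst).Nodup) :
    (l.foldl (fun d kv => if kv.2 ≠ 0 then d.insert kv.1 kv.2 else d) acc).items
      = acc.items ++ zfilter l := by
  induction l generalizing acc with
  | nil => simp [zfilter]
  | cons kv t ih =>
    obtain ⟨k, v⟩ := kv
    simp only [List.map_cons, List.foldl_cons] at h ⊢
    have hk : k ∉ acc.keys := by
      have hd := List.disjoint_of_nodup_append h
      exact fun hm => hd hm (List.mem_cons_self ..)
    have hc : acc.contains k = false := by
      rw [← Bool.not_eq_true, PySem.Dict.contains_iff_mem_keys]; exact hk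
    by_cases hv : v ≠ 0
    · simp only [hv, if_pos, ne_eq, not_false_eq_true]
      rw [ih (acc.insert k v) (by
        rw [PySem.Dict.keys_insert_of_not_contains _ _ hc]
        simpa [List.append_assoc] using h)]
      rw [PySem.Dict.items_insert_of_not_contains _ _ hc]
      simp [zfilter, hv, List.append_assoc]
    · simp only [hv, if_false]
      rw [not_not] at hv
      rw [ih acc (h.sublist (((t.map Prod.fst).sublist_cons_self k).append_left acc.keys))]
      simp [zfilter, hv]

theorem cleanB_items (l : List (Int × Int)) (h : (l.map Prod.fst).Nodup) :
    (cleanB l).items = zfilter l := by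
  have := cleanB_items_aux l PySem.Dict.empty (by simpa using h)
  simpa [cleanB] using this

theorem cleanB_eq (l : List (Int × Int)) (h : (l.map Prod.fst).Nodup) :
    cleanB l = PySem.Dict.mk (zfilter l) :=
  PySem.Dict.ext (cleanB_items l h)

-- a loop over d's keys that looks each value up is a loop over d's items, for nodup keys
theorem foldl_keys_getD {β : Type} (d : PySem.Dict Int Int) (hnd : d.keys.Nodup)
    (g : β → Int → Int → β) (init : β) :
    d.keys.foldl (fun b k => g b k (d.getD k 0)) init
      = d.items.foldl (fun b kv => g b kv.1 kv.2) init := by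
  conv_rhs => rw [PySem.Dict.items_eq_map_keys d hnd 0]
  rw [List.foldl_map]

theorem polycleanA_items (d : PySem.Dict Int Int) (hnd : d.keys.Nodup) :
    (polycleanA d).items = zfilter d.items := by
  by_cases he : d = PySem.Dict.empty
  · subst he
    show PySem.Dict.empty.items = zfilter PySem.Dict.empty.items
    rfl
  · unfold polycleanA
    rw [if_neg he]
    rw [foldl_keys_getD d hnd (fun out k v => if v ≠ 0 then out.insert k v else out) PySem.Dict.empty]
    have := cleanB_items_aux d.items PySem.Dict.empty (by simpa [PySem.Dict.keys] using hnd)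
    simpa using this

theorem polycleanA_eq (d : PySem.Dict Int Int) (hnd : d.keys.Nodup) :
    polycleanA d = PySem.Dict.mk (zfilter d.items) :=
  PySem.Dict.ext (polycleanA_items d hnd)

theorem mk_eq_empty_iff (l : List (Int × Int)) :
    PySem.Dict.mk l = (PySem.Dict.empty : PySem.Dict Int Int) ↔ l = [] := by
  rw [PySem.Dict.ext_iff]; exact Iff.rfl

theorem polyzeroA_mk (l : List (Int × Int)) (h : (l.map Prod.fst).Nodup)
    (hz : zfilter l = l) :
    polyzeroA (PySem.Dict.mk l) = decide (l = []) := by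
  unfold polyzeroA
  rw [polycleanA_eq _ (by simpa [PySem.Dict.keys] using h)]
  show decide (PySem.Dict.mk (zfilter l) = PySem.Dict.empty) = decide (l = [])
  rw [hz]
  simp [mk_eq_empty_iff]

-- A's read-modify-write on result[power] is a single insert
theorem step_eq (r : PySem.Dict Int Int) (k v : Int) :
    (if r.contains k then r else r.insert k 0).insert k
      ((if r.contains k then r else r.insert k 0).getD k 0 + v)
    = r.insert k (r.getD k 0 + v) := by
  by_cases hc : r.contains k
  · simp [hc]
  · simp only [hc, Bool.false_eq_true, if_false]
    rw [PySem.Dict.getD_insert_self, PySem.Dict.insert_insert_self,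
        PySem.Dict.getD_of_not_contains _ _ (Bool.not_eq_true _ ▸ eq_false_of_ne_true hc), zero_add]

-- distmon of the cleaned p1 by a non-zero monomial {b: bc}
theorem distmonA_eq (c1 : List (Int × Int)) (hnd : (c1.map Prod.fst).Nodup)
    (hall : zfilter c1 = c1) (b bc : Int) (hbc : bc ≠ 0) :
    distmonA (PySem.Dict.mk c1) (PySem.Dict.insert PySem.Dict.empty b bc)
      = PySem.Dict.mk (c1.map (fun av => (av.1 + b, av.2 * bc))) := by
  have hkeys : (PySem.Dict.mk c1).keys.Nodup := by simpa [PySem.Dict.keys] using hnd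
  have hpoly : polycleanA (PySem.Dict.mk c1) = PySem.Dict.mk c1 := by
    rw [polycleanA_eq _ hkeys]
    show PySem.Dict.mk (zfilter c1) = _
    rw [hall]
  have hmono : PySem.Dict.insert PySem.Dict.empty b bc = PySem.Dict.mk [(b, bc)] := by
    apply PySem.Dict.ext
    rw [PySem.Dict.items_insert_of_not_contains _ _ (PySem.Dict.contains_empty b)]
    rfl
  have hzm : polyzeroA (PySem.Dict.mk [(b, bc)]) = false := by
    rw [polyzeroA_mk [(b, bc)] (by simp) (by simp [zfilter, hbc])]
    simp
  have hvals : ∀ av ∈ c1, av.2 ≠ 0 := by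
    intro av hav
    have := List.filter_eq_self.mp hall av hav
    simpa using this
  have hmapnd : (c1.map (fun av => av.1 + b)).Nodup := by
    have : c1.map (fun av => av.1 + b) = (c1.map Prod.fst).map (fun a => a + b) := by
      rw [List.map_map]; rfl
    rw [this]
    exact hnd.map (fun x y hxy => by omega)
  unfold distmonA
  rw [hpoly, hmono, hzm]
  simp only [polyzeroA_mk c1 hnd hall]
  by_cases hc : c1 = []
  · subst hc
    simp
    rfl
  · simp only [hc, decide_false, Bool.false_or, Bool.false_eq_true, if_false]
    have hkeysm : (PySem.Dict.mk [(b, bc)]).keys = [b] := by simp [PySem.Dict.keys]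
    have hco : (PySem.Dict.mk [(b, bc)]).getD b 0 = bc := by
      simp [PySem.Dict.getD_eq_get?_getD, PySem.Dict.get?_mk_cons]
    simp only [hkeysm, PySem.List.pyGetD_zero_cons, hco]
    rw [foldl_keys_getD (PySem.Dict.mk c1) hkeys
      (fun r k v => r.insert (k + b) (v * bc)) PySem.Dict.empty]
    have hfresh := PySem.Dict.items_foldl_insert_fresh c1 (fun av => av.1 + b)
      (fun av => av.2 * bc) PySem.Dict.empty
      (fun a _ => PySem.Dict.contains_empty _) hmapnd
    have hres : ((PySem.Dict.mk c1).items.foldl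
        (fun r kv => r.insert (kv.1 + b) (kv.2 * bc)) PySem.Dict.empty).items
        = c1.map (fun av => (av.1 + b, av.2 * bc)) := by
      exact hfresh
    apply PySem.Dict.ext
    rw [polycleanA_items _ (by
      rw [PySem.Dict.keys, hres]
      simpa [List.map_map] using hmapnd)]
    rw [hres]
    show zfilter _ = _
    apply List.filter_eq_self.mpr
    intro a ha
    obtain ⟨av, hav, rfl⟩ := List.mem_map.mp ha
    simpa using mul_ne_zero (hvals av hav) hbc

-- the accumulation dict of a pair list: value at s is the total contribution to s
theorem accum_getD (l : List (Int × Int)) (d : PySem.Dict Int Int) (s : Int) :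
    (l.foldl (fun r kv => r.insert kv.1 (r.getD kv.1 0 + kv.2)) d).getD s 0
      = d.getD s 0 + pvSumAt l s := by
  induction l generalizing d with
  | nil => simp [pvSumAt]
  | cons kv t ih =>
    simp only [List.foldl_cons, ih, PySem.Dict.getD_insert, pvSumAt, List.map_cons, List.sum_cons]
    by_cases h : s = kv.1
    · subst h; simp; ring
    · rw [if_neg h, if_neg (fun hh => h hh.symm)]; ring

-- its items: one entry per distinct power, in first-occurrence order, carrying the total
theorem accum_items (l : List (Int × Int)) :
    (l.foldl (fun r kv => r.insert kv.1 (r.getD kv.1 0 + kv.2)) PySem.Dict.empty).items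
      = (PySem.List.dedup (l.map Prod.fst)).map (fun s => (s, pvSumAt l s)) := by
  have hnd : (l.foldl (fun r kv => r.insert kv.1 (r.getD kv.1 0 + kv.2))
      PySem.Dict.empty).keys.Nodup :=
    PySem.Dict.nodup_keys_foldl_insert_key l Prod.fst
      (fun r kv => r.getD kv.1 0 + kv.2) PySem.Dict.empty (by simp)
  have hkeys : (l.foldl (fun r kv => r.insert kv.1 (r.getD kv.1 0 + kv.2))
      PySem.Dict.empty).keys = PySem.List.dedup (l.map Prod.fst) := by
    rw [PySem.Dict.keys_foldl_insert_key l Prod.fst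
      (fun r kv => r.getD kv.1 0 + kv.2) PySem.Dict.empty]
    rw [PySem.List.dedup_eq_ofList]
    rfl
  rw [PySem.Dict.items_eq_map_keys _ hnd 0, hkeys]
  apply List.map_congr_left
  intro s _
  rw [accum_getD]
  simp

-- a nodup association list sums to a single lookup
theorem sum_ite_eq_lookup (c2 : List (Int × Int)) (hnd : (c2.map Prod.fst).Nodup)
    (k m : Int) :
    (c2.map (fun bv => if bv.1 = k then m * bv.2 else 0)).sum
      = if (PySem.Dict.mk c2).contains k then m * (PySem.Dict.mk c2).getD k 0 else 0 := by
  induction c2 with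
  | nil => simp
  | cons bv t ih =>
    obtain ⟨b, w⟩ := bv
    simp only [List.map_cons] at hnd
    obtain ⟨hh, ht⟩ := List.nodup_cons.mp hnd
    simp only [List.map_cons, List.sum_cons]
    have hcons : ∀ x : Int, (PySem.Dict.mk ((b, w) :: t)).get? x
        = if b == x then some w else (PySem.Dict.mk t).get? x :=
      fun x => PySem.Dict.get?_mk_cons b w t x
    by_cases hk : b = k
    · subst hk
      have hnot : (PySem.Dict.mk t).contains b = false := by
        rw [← Bool.not_eq_true, PySem.Dict.contains_iff_mem_keys]
        simpa [PySem.Dict.keys] using hh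
      have htail : (t.map (fun bv' => if bv'.1 = b then m * bv'.2 else 0)).sum = 0 := by
        rw [ih ht]; simp [hnot]
      have hct : (PySem.Dict.mk ((b, w) :: t)).contains b = true := by
        rw [PySem.Dict.contains_eq_isSome_get?, hcons]; simp
      have hgd : (PySem.Dict.mk ((b, w) :: t)).getD b 0 = w := by
        rw [PySem.Dict.getD_eq_get?_getD, hcons]; simp
      rw [show (if ((b, w) : Int × Int).1 = b then m * ((b, w) : Int × Int).2 else 0) = m * w
        from if_pos rfl, htail, add_zero, hct, if_pos rfl, hgd]
    · have hbk : (b == k) = false := by simpa using hk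
      have hc : (PySem.Dict.mk ((b, w) :: t)).contains k = (PySem.Dict.mk t).contains k := by
        rw [PySem.Dict.contains_eq_isSome_get?, PySem.Dict.contains_eq_isSome_get?, hcons]
        simp [hbk]
      have hg : (PySem.Dict.mk ((b, w) :: t)).getD k 0 = (PySem.Dict.mk t).getD k 0 := by
        rw [PySem.Dict.getD_eq_get?_getD, PySem.Dict.getD_eq_get?_getD, hcons]
        simp [hbk]
      rw [show (if ((b, w) : Int × Int).1 = k then m * ((b, w) : Int × Int).2 else 0) = 0
        from if_neg hk, zero_add, ih ht, hc, hg]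

-- the pair-list sum unfolded into a double sum over c2 then c1
theorem sumAt_pairs (c1 c2 : List (Int × Int)) (s : Int) :
    pvSumAt (pvPairs c1 c2) s
      = (c2.map (fun bv => (c1.map (fun av =>
          if av.1 + bv.1 = s then av.2 * bv.2 else 0)).sum)).sum := by
  unfold pvSumAt pvPairs
  rw [List.map_flatMap]
  induction c2 with
  | nil => simp
  | cons bv t ih =>
    simp only [List.map_map, Function.comp_def] at ih ⊢
    simp only [List.flatMap_cons, List.sum_append, List.map_cons, List.sum_cons, ih]

-- swapping the two summations (Int addition is commutative)
theorem sum_sum_comm (c1 c2 : List (Int × Int)) (f : Int × Int → Int × Int → Int) :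
    (c2.map (fun bv => (c1.map (fun av => f av bv)).sum)).sum
      = (c1.map (fun av => (c2.map (fun bv => f av bv)).sum)).sum := by
  induction c2 with
  | nil => simp
  | cons bv t ih => simp [ih, ← List.sum_map_add]

-- B's convolution sum at s equals the total contribution of A's pair list at s
theorem convB_eq_sumAt (c1 c2 : List (Int × Int))
    (h1 : (c1.map Prod.fst).Nodup) (h2 : (c2.map Prod.fst).Nodup) (s : Int) :
    convB (PySem.Dict.mk c1) (PySem.Dict.mk c2) s = pvSumAt (pvPairs c1 c2) s := by
  have hk1 : (PySem.Dict.mk c1).keys.Nodup := by simpa [PySem.Dict.keys] using h1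
  unfold convB
  rw [foldl_keys_getD (PySem.Dict.mk c1) hk1
    (fun acc a v => if (PySem.Dict.mk c2).contains (s - a) then
      acc + v * (PySem.Dict.mk c2).getD (s - a) 0 else acc) 0]
  show c1.foldl (fun acc av => if (PySem.Dict.mk c2).contains (s - av.1) then
      acc + av.2 * (PySem.Dict.mk c2).getD (s - av.1) 0 else acc) 0 = _
  rw [PySem.List.foldl_congr_mem c1 _
    (fun acc av => acc + (if (PySem.Dict.mk c2).contains (s - av.1) then
      av.2 * (PySem.Dict.mk c2).getD (s - av.1) 0 else 0)) 0
    (by intro acc av _; by_cases h : (PySem.Dict.mk c2).contains (s - av.1) <;> simp [h])]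
  rw [PySem.List.foldl_add]
  rw [zero_add]
  rw [sumAt_pairs c1 c2 s, sum_sum_comm]
  apply congrArg
  apply List.map_congr_left
  intro av _
  rw [show (fun bv : Int × Int => if av.1 + bv.1 = s then av.2 * bv.2 else 0)
      = (fun bv : Int × Int => if bv.1 = s - av.1 then av.2 * bv.2 else 0) by
    funext bv; by_cases h : bv.1 = s - av.1
    · rw [if_pos (by omega), if_pos h]
    · rw [if_neg (by omega), if_neg h]]
  exact (sum_ite_eq_lookup c2 h2 (s - av.1) av.2).symm

-- ===== VERDICT (by name: the statement is the Claim_ definition above) =====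
theorem polymult_spec : Claim_equal_polymult := by
  intro p1 p2 _ hpre
  obtain ⟨h1, h2⟩ := hpre
  unfold Spec_polymult
  have nz1 := zfilter_nodup_fst p1 h1
  have nz2 := zfilter_nodup_fst p2 h2
  have hk1 : (PySem.Dict.mk p1).keys.Nodup := by simpa [PySem.Dict.keys] using h1
  have hk2 : (PySem.Dict.mk p2).keys.Nodup := by simpa [PySem.Dict.keys] using h2
  have hq1 : polycleanA (PySem.Dict.mk p1) = PySem.Dict.mk (zfilter p1) := polycleanA_eq _ hk1
  have hq2 : polycleanA (PySem.Dict.mk p2) = PySem.Dict.mk (zfilter p2) := polycleanA_eq _ hk2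
  have hz1 : polyzeroA (PySem.Dict.mk (zfilter p1)) = decide (zfilter p1 = []) :=
    polyzeroA_mk _ nz1 (zfilter_idem p1)
  have hz2 : polyzeroA (PySem.Dict.mk (zfilter p2)) = decide (zfilter p2 = []) :=
    polyzeroA_mk _ nz2 (zfilter_idem p2)
  have hb1 : cleanB p1 = PySem.Dict.mk (zfilter p1) := cleanB_eq p1 h1
  have hb2 : cleanB p2 = PySem.Dict.mk (zfilter p2) := cleanB_eq p2 h2
  have hnk1 : (PySem.Dict.mk (zfilter p1)).keys.Nodup := by
    simpa [PySem.Dict.keys] using nz1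
  have hnk2 : (PySem.Dict.mk (zfilter p2)).keys.Nodup := by
    simpa [PySem.Dict.keys] using nz2
  unfold polymult polymult_alt
  simp only [hq1, hq2, hz1, hz2, hb1, hb2]
  -- B's output items: a filter-insert loop over the (nodup) power list
  have hBitems : ∀ powers : List Int, powers.Nodup →
      ((powers.foldl (fun out s =>
          let c := convB (PySem.Dict.mk (zfilter p1)) (PySem.Dict.mk (zfilter p2)) s
          if c ≠ 0 then out.insert s c else out) PySem.Dict.empty).items)
      = zfilter (powers.map (fun s =>
          (s, convB (PySem.Dict.mk (zfilter p1)) (PySem.Dict.mk (zfilter p2)) s))) := by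
    intro powers hnd
    have hmapfold : (powers.foldl (fun out s =>
          let c := convB (PySem.Dict.mk (zfilter p1)) (PySem.Dict.mk (zfilter p2)) s
          if c ≠ 0 then out.insert s c else out) PySem.Dict.empty)
        = ((powers.map (fun s => (s, convB (PySem.Dict.mk (zfilter p1))
            (PySem.Dict.mk (zfilter p2)) s))).foldl
            (fun d kv => if kv.2 ≠ 0 then d.insert kv.1 kv.2 else d) PySem.Dict.empty) := by
      rw [List.foldl_map]
    rw [hmapfold, cleanB_items_aux _ PySem.Dict.empty (by
      simpa [List.map_map, Function.comp_def] using hnd)]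
    rw [show (PySem.Dict.empty : PySem.Dict Int Int).items = [] from rfl, List.nil_append]
  rw [hBitems _ (PySem.List.nodup_dedup _)]
  by_cases hc1 : zfilter p1 = []
  · -- p1 cleans to zero: A returns [], B's power list is empty
    simp only [hc1, decide_true, Bool.true_or, if_true]
    simp [PySem.Dict.keys, zfilter, PySem.List.dedup_eq_ofList]
  · by_cases hc2 : zfilter p2 = []
    · simp only [hc2, decide_true, Bool.or_true, if_true]
      simp [PySem.Dict.keys, zfilter, PySem.List.dedup_eq_ofList]
    · simp only [hc1, hc2, decide_false, Bool.or_self, Bool.false_eq_true, if_false]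
      -- A's list of intermediates is a map over the cleaned p2
      rw [foldl_keys_getD (PySem.Dict.mk (zfilter p2)) hnk2
        (fun acc k v => acc ++ [distmonA (PySem.Dict.mk (zfilter p1))
          (PySem.Dict.insert PySem.Dict.empty k v)]) []]
      show (addpolysA ((zfilter p2).foldl (fun acc kv => acc ++
        [distmonA (PySem.Dict.mk (zfilter p1))
          (PySem.Dict.insert PySem.Dict.empty kv.1 kv.2)]) [])).items = _
      rw [PySem.List.foldl_append_singleton_eq_map
        (fun kv : Int × Int => distmonA (PySem.Dict.mk (zfilter p1))
          (PySem.Dict.insert PySem.Dict.empty kv.1 kv.2)) (zfilter p2) []]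
      rw [List.nil_append]
      unfold addpolysA
      rw [List.foldl_map]
      -- each addpolys step on a distmon result is one accumulation pass over c1
      rw [PySem.List.foldl_congr_mem (zfilter p2) _
        (fun r bv => (zfilter p1).foldl (fun r av =>
          r.insert (av.1 + bv.1) (r.getD (av.1 + bv.1) 0 + av.2 * bv.2)) r)
        PySem.Dict.empty ?_]
      · -- A's accumulated dict is the accumulation of the flat pair list
        rw [show ((zfilter p2).foldl (fun r bv => (zfilter p1).foldl (fun r av =>
            r.insert (av.1 + bv.1) (r.getD (av.1 + bv.1) 0 + av.2 * bv.2)) r)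
            PySem.Dict.empty)
          = (pvPairs (zfilter p1) (zfilter p2)).foldl
              (fun r kv => r.insert kv.1 (r.getD kv.1 0 + kv.2)) PySem.Dict.empty by
          unfold pvPairs
          rw [List.foldl_flatMap]
          apply PySem.List.foldl_congr_mem
          intro acc bv _
          rw [List.foldl_map]]
        rw [polycleanA_items _ (PySem.Dict.nodup_keys_foldl_insert_key _ Prod.fst
          (fun r kv => r.getD kv.1 0 + kv.2) PySem.Dict.empty (by simp))]
        rw [accum_items]
        apply congrArg
        have hpow : PySem.List.dedup ((PySem.Dict.mk (zfilter p2)).keys.flatMap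
            (fun b => (PySem.Dict.mk (zfilter p1)).keys.map (fun a => a + b)))
          = PySem.List.dedup ((pvPairs (zfilter p1) (zfilter p2)).map Prod.fst) := by
          unfold pvPairs
          rw [List.map_flatMap]
          simp [PySem.Dict.keys, List.flatMap_map, List.map_map, Function.comp_def]
        rw [hpow]
        apply List.map_congr_left
        intro s _
        rw [convB_eq_sumAt _ _ nz1 nz2]
      · intro acc bv hbv
        have hbc : bv.2 ≠ 0 := by
          have := List.mem_filter.mp hbv
          simpa using this.2
        rw [distmonA_eq (zfilter p1) nz1 (zfilter_idem p1) bv.1 bv.2 hbc]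
        have hmnd : ((zfilter p1).map (fun av => av.1 + bv.1)).Nodup := by
          have : (zfilter p1).map (fun av => av.1 + bv.1)
              = ((zfilter p1).map Prod.fst).map (fun a => a + bv.1) := by
            rw [List.map_map]; rfl
          rw [this]
          exact nz1.map (fun x y hxy => by omega)
        have hmk : (PySem.Dict.mk ((zfilter p1).map
            (fun av => (av.1 + bv.1, av.2 * bv.2)))).keys.Nodup := by
          simpa [PySem.Dict.keys, List.map_map] using hmnd
        have hmz : zfilter ((zfilter p1).map (fun av => (av.1 + bv.1, av.2 * bv.2)))
            = (zfilter p1).map (fun av => (av.1 + bv.1, av.2 * bv.2)) := by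
          apply List.filter_eq_self.mpr
          intro a ha
          obtain ⟨av, hav, rfl⟩ := List.mem_map.mp ha
          have hv2 : av.2 ≠ 0 := by
            have := List.mem_filter.mp hav
            simpa using this.2
          simpa using mul_ne_zero hv2 hbc
        have hpc : polycleanA (PySem.Dict.mk ((zfilter p1).map
            (fun av => (av.1 + bv.1, av.2 * bv.2))))
            = PySem.Dict.mk ((zfilter p1).map (fun av => (av.1 + bv.1, av.2 * bv.2))) := by
          rw [polycleanA_eq _ hmk]
          show PySem.Dict.mk (zfilter _) = _
          rw [hmz]
        have hpz : polyzeroA (PySem.Dict.mk ((zfilter p1).map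
            (fun av => (av.1 + bv.1, av.2 * bv.2)))) = false := by
          rw [polyzeroA_mk _ (by simpa [List.map_map] using hmnd) hmz]
          simp [hc1]
        rw [hpc]
        simp only [hpz, Bool.false_eq_true, if_false]
        rw [foldl_keys_getD _ hmk
          (fun r k v => (if r.contains k then r else r.insert k 0).insert k
            ((if r.contains k then r else r.insert k 0).getD k 0 + v)) acc]
        show ((zfilter p1).map (fun av => (av.1 + bv.1, av.2 * bv.2))).foldl _ acc = _
        rw [List.foldl_map]
        simp only [step_eq]
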